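-- pv_equiv track=rewrite | github.com/mechanical-girl/kobold-training-club | ktc/api.py | sort_sizes
-- ===== SOURCE A (Python) =====
-- from typing import Dict, List, Tuple
--
-- def sort_sizes(size_list: List[str]) -> List[str]:
--     """
--     Given a list of sizes, sorts them by the size they describe
--
--     Args:
--         size_list (List[str]): Unordered list of sizes
--
--     Returns:
--         List[str]: Ordered list of sizes
--     """
--     to_return = []
--
--     size_list = [size.lower() for size in size_list]
--
--     if "tiny" in size_list:
--         to_return.append("tiny")
--     if "small" in size_list:
--         to_return.append("small")
--     if "medium" in size_list:
--         to_return.append("medium")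
--     if "large" in size_list:
--         to_return.append("large")
--     if "huge" in size_list:
--         to_return.append("huge")
--     if "gargantuan" in size_list:
--         to_return.append("gargantuan")
--
--     to_return = [size.title() for size in to_return]
--     return to_return
-- ===== SOURCE B (Python) =====
-- def sort_sizes(size_list):
--     """
--     Given a list of sizes, sorts them by the size they describe
--
--     Args:
--         size_list (List[str]): Unordered list of sizes
--
--     Returns:
--         List[str]: Ordered list of sizes
--     """
--     rank = {"tiny": 0, "small": 1, "medium": 2, "large": 3, "huge": 4, "gargantuan": 5}
--     present = set()
--     for size in size_list:
--         s = size.lower()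
--         if s in rank:
--             present.add(s)
--     return [s.title() for s in sorted(present, key=lambda s: rank[s])]
-- ===== Notes on version B (the rewrite author's own statement) =====
-- stated objective: idiomatic
-- what changed: Replaces the six sequential membership scans of the lowercased list by a single pass that collects canonical sizes into a set via a rank table and then sorts the (at most 6) present keys by rank.
import Mathlib
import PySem

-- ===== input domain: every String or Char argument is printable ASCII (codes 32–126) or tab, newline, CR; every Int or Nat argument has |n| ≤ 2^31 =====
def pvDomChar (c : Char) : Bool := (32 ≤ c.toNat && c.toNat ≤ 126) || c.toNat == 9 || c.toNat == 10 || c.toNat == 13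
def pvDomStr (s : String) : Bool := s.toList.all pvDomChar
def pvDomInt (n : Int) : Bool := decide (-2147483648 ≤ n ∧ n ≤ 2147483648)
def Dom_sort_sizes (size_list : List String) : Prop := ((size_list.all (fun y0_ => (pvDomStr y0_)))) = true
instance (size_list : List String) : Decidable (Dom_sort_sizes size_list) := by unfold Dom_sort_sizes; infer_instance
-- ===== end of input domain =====

-- B replaces A's six sequential membership-test branches by one pass over the input that
-- collects the canonical keys into a set and then sorts them by a rank table (idiomatic rewrite).

-- hand port of Python str.title(): a letter starting a run of letters is uppercased, the
-- rest lowercased; exact on the ASCII domain (where 'cased' = alphabetic).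
def pyTitleChars : List Char → Bool → List Char
  | [], _ => []
  | c :: cs, prev =>
    (if PySem.Chars.isalpha c then (if prev then PySem.Chars.lowerChar c else PySem.Chars.upperChar c) else c)
      :: pyTitleChars cs (PySem.Chars.isalpha c)

def pyTitle (s : String) : String := String.ofList (pyTitleChars s.toList false)

-- ===== PORT A =====
def sort_sizes (size_list : List String) : List String :=
  let sl := size_list.map PySem.Str.lower
  let t0 : List String := []
  let t1 := if "tiny" ∈ sl then t0 ++ ["tiny"] else t0
  let t2 := if "small" ∈ sl then t1 ++ ["small"] else t1
  let t3 := if "medium" ∈ sl then t2 ++ ["medium"] else t2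
  let t4 := if "large" ∈ sl then t3 ++ ["large"] else t3
  let t5 := if "huge" ∈ sl then t4 ++ ["huge"] else t4
  let t6 := if "gargantuan" ∈ sl then t5 ++ ["gargantuan"] else t5
  t6.map pyTitle

-- ===== PORT B =====
def rankDict : PySem.Dict String Int :=
  PySem.Dict.ofList [("tiny", 0), ("small", 1), ("medium", 2), ("large", 3), ("huge", 4), ("gargantuan", 5)]

def sort_sizes_alt (size_list : List String) : List String :=
  let present : PySem.Set String := size_list.foldl (fun acc size =>
    let s := PySem.Str.lower size
    if PySem.Dict.contains rankDict s then PySem.Set.add acc s else acc) PySem.Set.empty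
  -- rank[s]: s is always a key of rankDict here, so getD is exact
  (PySem.List.sorted present (fun s => PySem.Dict.getD rankDict s 0) false).map pyTitle

-- ===== PRECONDITION & SPEC =====
def Spec_sort_sizes (size_list : List String) (out : List String) : Prop := out = sort_sizes_alt size_list
instance (size_list : List String) (out : List String) : Decidable (Spec_sort_sizes size_list out) := by unfold Spec_sort_sizes; infer_instance

-- ===== CLAIM (what is proved, stated in full; the proofs are below) =====
def Claim_equal_sort_sizes : Prop := ∀ (size_list : List String), Dom_sort_sizes size_list → Spec_sort_sizes size_list (sort_sizes size_list)

-- ===== LEMMAS AND PROOFS =====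

def canonSizes : List String := ["tiny", "small", "medium", "large", "huge", "gargantuan"]

def rankKey : String → Int := fun s => PySem.Dict.getD rankDict s 0

def stepB (acc : PySem.Set String) (size : String) : PySem.Set String :=
  let s := PySem.Str.lower size
  if PySem.Dict.contains rankDict s then PySem.Set.add acc s else acc

lemma keys_rank : rankDict.keys = canonSizes := by decide

lemma contains_rank (s : String) : PySem.Dict.contains rankDict s = decide (s ∈ canonSizes) := by
  have h := PySem.Dict.contains_iff_mem_keys (d := rankDict) (k := s)
  rw [keys_rank] at h
  rw [Bool.eq_iff_iff, h]
  simp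

lemma mem_foldl_stepB (l : List String) (acc : PySem.Set String) (x : String) :
    x ∈ l.foldl stepB acc ↔ x ∈ acc ∨ (x ∈ l.map PySem.Str.lower ∧ x ∈ canonSizes) := by
  induction l generalizing acc with
  | nil => simp
  | cons h t ih =>
    simp only [List.foldl_cons, List.map_cons, List.mem_cons, ih]
    unfold stepB
    simp only [contains_rank]
    by_cases hc : PySem.Str.lower h ∈ canonSizes
    · simp only [hc, decide_true, if_true, PySem.Set.mem_add]
      constructor
      · rintro (⟨hx | rfl⟩ | hx)
        exacts [Or.inl hx, Or.inr ⟨Or.inl rfl, hc⟩, Or.inr ⟨Or.inr hx.1, hx.2⟩]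
      · rintro (hx | ⟨rfl | hx, hx2⟩)
        exacts [Or.inl (Or.inl hx), Or.inl (Or.inr rfl), Or.inr ⟨hx, hx2⟩]
    · simp only [hc, decide_false, Bool.false_eq_true, if_false]
      constructor
      · rintro (hx | hx)
        exacts [Or.inl hx, Or.inr ⟨Or.inr hx.1, hx.2⟩]
      · rintro (hx | ⟨rfl | hx, hx2⟩)
        exacts [Or.inl hx, absurd hx2 hc, Or.inr ⟨hx, hx2⟩]

lemma nodup_foldl_stepB (l : List String) (acc : PySem.Set String) (h : acc.Nodup) :
    (l.foldl stepB acc).Nodup := by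
  induction l generalizing acc with
  | nil => exact h
  | cons a t ih =>
    simp only [List.foldl_cons, stepB]
    split
    · exact ih _ (PySem.Set.nodup_add _ _ h)
    · exact ih _ h

lemma canon_nodup : canonSizes.Nodup := by decide

lemma canon_pairwise : canonSizes.Pairwise (fun a b => rankKey a < rankKey b) := by decide

lemma sorted_present (l : List String) :
    PySem.List.sorted (l.foldl stepB PySem.Set.empty) rankKey false
      = canonSizes.filter (fun c => c ∈ l.map PySem.Str.lower) := by
  apply PySem.List.sorted_eq_of_perm_of_pairwise_lt
  · rw [List.perm_ext_iff_of_nodup (List.Nodup.filter _ canon_nodup)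
      (nodup_foldl_stepB l PySem.Set.empty (by simp [PySem.Set.empty]))]
    intro x
    simp only [List.mem_filter, mem_foldl_stepB, PySem.Set.empty, List.not_mem_nil, false_or,
      decide_eq_true_eq]
    tauto
  · exact List.Pairwise.sublist List.filter_sublist canon_pairwise

lemma alt_eq (l : List String) :
    sort_sizes_alt l = (PySem.List.sorted (l.foldl stepB PySem.Set.empty) rankKey false).map pyTitle := rfl

lemma sort_sizes_eq_filter (size_list : List String) :
    sort_sizes size_list
      = (canonSizes.filter (fun c => c ∈ size_list.map PySem.Str.lower)).map pyTitle := by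
  unfold sort_sizes canonSizes
  simp only [List.filter_cons, List.filter_nil, decide_eq_true_eq]
  split_ifs <;> rfl

-- ===== VERDICT (by name: the statement is the Claim_ definition above) =====
theorem sort_sizes_spec : Claim_equal_sort_sizes := by
  intro size_list _
  show sort_sizes size_list = sort_sizes_alt size_list
  rw [sort_sizes_eq_filter, alt_eq, sorted_present]
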